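-- pv_equiv track=rewrite | github.com/aldenweaver/docs_analyzer | research/iteration2/doc_quality_automation 1.py | _find_code_block_line
-- ===== SOURCE A (Python) =====
-- def _find_code_block_line(content: str, block_index: int) -> int:
--     """Find the line number of a code block."""
--     count = 0
--     for line_num, line in enumerate(content.split('\n'), 1):
--         if line.strip().startswith('```'):
--             if count == block_index:
--                 return line_num
--             count += 1
--     return 1
-- ===== SOURCE B (Python) =====
-- def _find_code_block_line(content: str, block_index: int) -> int:
--     """Single character-level scan: no line splitting; a per-line fence state machine."""
--     count = 0
--     line_num = 1
--     st = 0  # 0: in leading whitespace, 1-2: backticks seen, 3: fence handled, -1: not a fence line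
--     for ch in content:
--         if ch == '\n':
--             line_num += 1
--             st = 0
--         elif 0 <= st < 3:
--             if ch == '`':
--                 st += 1
--                 if st == 3:
--                     if count == block_index:
--                         return line_num
--                     count += 1
--             elif st == 0 and ch.isspace():
--                 pass
--             else:
--                 st = -1
--     return 1
-- ===== Notes on version B (the rewrite author's own statement) =====
-- stated objective: alternative
-- what changed: B never splits the text into lines: it makes one character-level pass over the raw string with a per-line fence state machine (leading-whitespace / backticks-seen / decided), counting fences and tracking the line number itself, instead of A's split('\n') + per-line strip().startswith('```').
import Mathlib
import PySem

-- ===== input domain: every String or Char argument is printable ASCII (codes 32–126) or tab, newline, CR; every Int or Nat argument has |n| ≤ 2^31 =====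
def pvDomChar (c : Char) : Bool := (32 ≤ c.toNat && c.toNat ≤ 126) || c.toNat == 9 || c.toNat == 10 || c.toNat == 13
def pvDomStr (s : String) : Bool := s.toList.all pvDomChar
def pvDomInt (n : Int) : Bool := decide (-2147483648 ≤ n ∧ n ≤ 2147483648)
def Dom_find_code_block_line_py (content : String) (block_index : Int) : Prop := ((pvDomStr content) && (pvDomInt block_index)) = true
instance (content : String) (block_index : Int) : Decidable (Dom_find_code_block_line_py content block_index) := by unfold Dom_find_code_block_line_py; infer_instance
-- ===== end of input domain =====

-- B makes one character-level pass with a per-line fence state machine instead of A's split-into-lines + strip/startswith per line (alternative algorithm, same cost).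


-- ===== PORT A =====
-- A's for-loop over content.split('\n') with a running counter and early return; lineNum is enumerate's counter (start 1)
def findLoopA : List String → Int → Int → Int → Int
  | [], _, _, _ => 1
  | l :: ls, lineNum, count, bi =>
    if PySem.Str.startswith (PySem.Str.strip l) "```" then
      if count = bi then lineNum
      else findLoopA ls (lineNum + 1) (count + 1) bi
    else findLoopA ls (lineNum + 1) count bi

def find_code_block_line_py (content : String) (block_index : Int) : Int :=
  findLoopA ((PySem.Str.split? content "\n").getD []) 1 0 block_index

-- ===== PORT B =====
-- Source B's 'for ch in content' loop: state vars (line_num, count, st), early return on the third backtick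
def findB : List Char → Int → Int → Int → Int → Int
  | [], _, _, _, _ => 1
  | ch :: cs, lineNum, count, st, bi =>
    if ch = '\n' then findB cs (lineNum + 1) count 0 bi
    else if 0 ≤ st ∧ st < 3 then
      if ch = '`' then
        if st + 1 = 3 then
          if count = bi then lineNum
          else findB cs lineNum (count + 1) (st + 1) bi
        else findB cs lineNum count (st + 1) bi
      else if st = 0 ∧ PySem.Chars.isspace ch then findB cs lineNum count st bi
      else findB cs lineNum count (-1) bi
    else findB cs lineNum count st bi

def find_code_block_line_py_alt (content : String) (block_index : Int) : Int :=
  findB content.toList 1 0 0 block_index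

-- ===== PRECONDITION & SPEC =====
def Spec_find_code_block_line_py (content : String) (block_index : Int) (out : Int) : Prop := out = find_code_block_line_py_alt content block_index
instance (content : String) (block_index : Int) (out : Int) : Decidable (Spec_find_code_block_line_py content block_index out) := by unfold Spec_find_code_block_line_py; infer_instance

-- ===== CLAIM (what is proved, stated in full; the proofs are below) =====
def Claim_equal_find_code_block_line_py : Prop := ∀ (content : String) (block_index : Int), Dom_find_code_block_line_py content block_index → Spec_find_code_block_line_py content block_index (find_code_block_line_py content block_index)

-- ===== LEMMAS AND PROOFS =====

-- functional summary of B's per-line state machine (proof device only)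
def scanLine : List Char → Int → Int
  | [], st => st
  | ch :: cs, st =>
    if 0 ≤ st ∧ st < 3 then
      if ch = '`' then scanLine cs (st + 1)
      else if st = 0 ∧ PySem.Chars.isspace ch then scanLine cs st
      else scanLine cs (-1)
    else scanLine cs st

-- a reference 'split on newline' mediating between PySem.Chars.splitOn and findB
def consFst (c : Char) : List (List Char) → List (List Char)
  | [] => [[c]]
  | l :: ls => (c :: l) :: ls

def myLines : List Char → List (List Char)
  | [] => [[]]
  | c :: cs => if c = '\n' then [] :: myLines cs else consFst c (myLines cs)

def prependFst (p : List Char) : List (List Char) → List (List Char)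
  | [] => [p]
  | l :: ls => (p ++ l) :: ls

theorem myLines_ne_nil (s : List Char) : myLines s ≠ [] := by
  cases s with
  | nil => simp [myLines]
  | cons c cs =>
    simp only [myLines]
    split
    · simp
    · cases h : myLines cs <;> simp [consFst]

theorem splitOn_go_eq (s : List Char) : ∀ (fuel : Nat) (cur : List Char) (acc : List (List Char)),
    s.length < fuel →
    PySem.Chars.splitOn.go ['\n'] fuel s cur acc = acc.reverse ++ prependFst cur.reverse (myLines s) := by
  induction s with
  | nil =>
    intro fuel cur acc hf
    cases fuel with
    | zero => omega
    | succ f => simp [PySem.Chars.splitOn.go, myLines, prependFst]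
  | cons c cs ih =>
    intro fuel cur acc hf
    cases fuel with
    | zero => simp at hf
    | succ f =>
      by_cases hc : c = '\n'
      · subst hc
        have hpre : List.isPrefixOf ['\n'] ('\n' :: cs) = true := by simp [List.isPrefixOf]
        simp only [PySem.Chars.splitOn.go, hpre, if_pos, List.length_cons, List.length_nil, List.drop_succ_cons, List.drop_zero]
        rw [ih f [] (cur.reverse :: acc) (by simpa using Nat.lt_of_succ_lt_succ hf)]
        simp only [myLines]
        obtain ⟨l, ls, hls⟩ : ∃ l ls, myLines cs = l :: ls := by
          cases h : myLines cs with
          | nil => exact absurd h (myLines_ne_nil cs)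
          | cons l ls => exact ⟨l, ls, rfl⟩
        simp [hls, prependFst, List.reverse_cons]
      · have hpre : List.isPrefixOf ['\n'] (c :: cs) = false := by
          simp [List.isPrefixOf]; exact fun h => absurd h.symm hc
        simp only [PySem.Chars.splitOn.go, hpre]
        rw [if_neg (by simp)]
        rw [ih f (c :: cur) acc (by simpa using Nat.lt_of_succ_lt_succ hf)]
        simp only [myLines, if_neg hc]
        obtain ⟨l, ls, hls⟩ : ∃ l ls, myLines cs = l :: ls := by
          cases h : myLines cs with
          | nil => exact absurd h (myLines_ne_nil cs)
          | cons l ls => exact ⟨l, ls, rfl⟩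
        simp [hls, prependFst, consFst]

theorem splitOn_eq_myLines (s : List Char) : PySem.Chars.splitOn s ['\n'] = myLines s := by
  rw [PySem.Chars.splitOn, splitOn_go_eq s (s.length+1) [] [] (by omega)]
  obtain ⟨l, ls, hls⟩ : ∃ l ls, myLines s = l :: ls := by
    cases h : myLines s with
    | nil => exact absurd h (myLines_ne_nil s)
    | cons l ls => exact ⟨l, ls, rfl⟩
  simp [hls, prependFst]

theorem scanLine_frozen (l : List Char) (st : Int) (h : ¬ (0 ≤ st ∧ st < 3)) : scanLine l st = st := by
  induction l with
  | nil => rfl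
  | cons c cs ih => simp only [scanLine, if_neg h]; exact ih

-- B skips the rest of a line once the state is decided
theorem findB_skip (l : List Char) : ∀ (rest : List Char) (n c st bi : Int),
    (∀ ch ∈ l, ch ≠ '\n') → ¬ (0 ≤ st ∧ st < 3) →
    findB (l ++ rest) n c st bi = findB rest n c st bi := by
  induction l with
  | nil => intros; rfl
  | cons ch cs ih =>
    intro rest n c st bi hnl hst
    have h1 : ch ≠ '\n' := hnl ch (by simp)
    simp only [List.cons_append, findB, if_neg h1, if_neg hst]
    exact ih rest n c st bi (fun x hx => hnl x (by simp [hx])) hst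

-- consuming one line's characters from a live state
theorem findB_line (l : List Char) : ∀ (rest : List Char) (n c st bi : Int),
    (∀ ch ∈ l, ch ≠ '\n') → 0 ≤ st → st < 3 →
    findB (l ++ rest) n c st bi =
      if scanLine l st = 3 then
        (if c = bi then n else findB rest n (c + 1) 3 bi)
      else findB rest n c (scanLine l st) bi := by
  induction l with
  | nil =>
    intro rest n c st bi _ h0 h3
    have : scanLine [] st = st := rfl
    rw [this, if_neg (by omega)]
    rfl
  | cons ch cs ih =>
    intro rest n c st bi hnl h0 h3
    have h1 : ch ≠ '\n' := hnl ch (by simp)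
    have hnl' : ∀ x ∈ cs, x ≠ '\n' := fun x hx => hnl x (by simp [hx])
    have hst : 0 ≤ st ∧ st < 3 := ⟨h0, h3⟩
    simp only [List.cons_append, findB, scanLine, if_neg h1, if_pos hst]
    by_cases hb : ch = '`'
    · simp only [if_pos hb]
      by_cases h2 : st + 1 = 3
      · rw [if_pos h2, h2]
        rw [scanLine_frozen cs 3 (by omega), if_pos rfl]
        by_cases hcbi : c = bi
        · simp [hcbi]
        · rw [if_neg hcbi, if_neg hcbi]
          exact findB_skip cs rest n (c+1) 3 bi hnl' (by omega)
      · rw [if_neg h2]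
        exact ih rest n c (st+1) bi hnl' (by omega) (by omega)
    · simp only [if_neg hb]
      by_cases hw : st = 0 ∧ PySem.Chars.isspace ch
      · rw [if_pos hw, if_pos hw]
        exact ih rest n c st bi hnl' h0 h3
      · rw [if_neg hw, if_neg hw]
        rw [scanLine_frozen cs (-1) (by omega), if_neg (by omega)]
        exact findB_skip cs rest n c (-1) bi hnl' (by omega)

theorem scanLine_fence1 (l : List Char) :
    (scanLine l 2 = 3) ↔ ['`'] <+: l := by
  cases l with
  | nil => simp [scanLine]
  | cons ch cs =>
    simp only [scanLine, if_pos (by norm_num : (0:Int) ≤ 2 ∧ (2:Int) < 3)]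
    by_cases hb : ch = '`'
    · subst hb
      rw [if_pos rfl, show (2:Int) + 1 = 3 from rfl, scanLine_frozen cs 3 (by omega)]
      simp
    · rw [if_neg hb, if_neg (by simp), scanLine_frozen cs (-1) (by omega)]
      constructor
      · intro h; omega
      · intro h; exact absurd (by
          rcases h with ⟨t, ht⟩
          simpa using (congrArg (fun x => x.head?) ht).symm) hb

theorem scanLine_fence2 (l : List Char) :
    (scanLine l 1 = 3) ↔ ['`','`'] <+: l := by
  cases l with
  | nil => simp [scanLine]
  | cons ch cs =>
    simp only [scanLine, if_pos (by norm_num : (0:Int) ≤ 1 ∧ (1:Int) < 3)]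
    by_cases hb : ch = '`'
    · subst hb
      rw [if_pos rfl, show (1:Int) + 1 = 2 from rfl]
      rw [scanLine_fence1]
      constructor
      · rintro ⟨t, ht⟩; exact ⟨t, by simp [← ht]⟩
      · rintro ⟨t, ht⟩
        exact ⟨t, by simpa using ht⟩
    · rw [if_neg hb, if_neg (by simp), scanLine_frozen cs (-1) (by omega)]
      constructor
      · intro h; omega
      · rintro ⟨t, ht⟩
        exact absurd (by simpa using (congrArg (fun x => x.head?) ht).symm) hb

theorem scanLine_fence0 (l : List Char) :
    (scanLine l 0 = 3) ↔ ['`','`','`'] <+: l.dropWhile PySem.Chars.isspace := by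
  induction l with
  | nil => simp [scanLine]
  | cons ch cs ih =>
    simp only [scanLine, if_pos (by norm_num : (0:Int) ≤ 0 ∧ (0:Int) < 3)]
    by_cases hb : ch = '`'
    · subst hb
      rw [if_pos rfl, show (0:Int) + 1 = 1 from rfl, scanLine_fence2]
      rw [List.dropWhile_cons_of_neg (by decide)]
      constructor
      · rintro ⟨t, ht⟩; exact ⟨t, by simp [← ht]⟩
      · rintro ⟨t, ht⟩; exact ⟨t, by simpa using ht⟩
    · rw [if_neg hb]
      by_cases hw : PySem.Chars.isspace ch
      · rw [if_pos (by simp [hw]), List.dropWhile_cons_of_pos hw]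
        exact ih
      · rw [if_neg (by simp [hw]), scanLine_frozen cs (-1) (by omega)]
        rw [List.dropWhile_cons_of_neg (by simp [hw])]
        constructor
        · intro h; omega
        · rintro ⟨t, ht⟩
          exact absurd (by simpa using (congrArg (fun x => x.head?) ht).symm) hb

-- rstrip cannot create or destroy a leading ``` (backticks are not whitespace)
theorem rstrip_fence (x : List Char) :
    (['`','`','`'] <+: PySem.Chars.rstrip x) ↔ ['`','`','`'] <+: x := by
  constructor
  · intro h
    refine h.trans ?_
    unfold PySem.Chars.rstrip
    have := List.dropWhile_suffix (l := x.reverse) (p := PySem.Chars.isspace)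
    exact (List.reverse_prefix.mpr (by simpa using this)).trans (by simp)
  · rintro ⟨t, ht⟩
    subst ht
    unfold PySem.Chars.rstrip
    rw [show ((['`','`','`'] ++ t).reverse) = t.reverse ++ ['`','`','`'] by simp, List.dropWhile_append]
    split
    · have hsp : PySem.Chars.isspace '`' = false := by decide
      simp [List.dropWhile, hsp]
    · simp

-- B's state machine recognises exactly A's strip().startswith('```') test
theorem fence_iff (l : List Char) :
    (scanLine l 0 = 3) ↔ PySem.Str.startswith (PySem.Str.strip (String.ofList l)) "```" = true := by
  rw [scanLine_fence0]
  rw [PySem.Str.startswith, PySem.Str.strip]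
  have ht : ("```" : String).toList = ['`','`','`'] := by decide
  simp only [String.toList_ofList, ht, PySem.Chars.startswith_iff]
  rw [PySem.Chars.strip, PySem.Chars.lstrip, rstrip_fence]

theorem myLines_no_nl (l : List Char) (h : ∀ ch ∈ l, ch ≠ '\n') : myLines l = [l] := by
  induction l with
  | nil => rfl
  | cons c cs ih =>
    have h1 : c ≠ '\n' := h c (by simp)
    rw [myLines, if_neg h1, ih (fun x hx => h x (by simp [hx]))]
    rfl

theorem myLines_append (l r : List Char) (h : ∀ ch ∈ l, ch ≠ '\n') :
    myLines (l ++ '\n' :: r) = l :: myLines r := by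
  induction l with
  | nil => simp [myLines]
  | cons c cs ih =>
    have h1 : c ≠ '\n' := h c (by simp)
    rw [List.cons_append, myLines, if_neg h1, ih (fun x hx => h x (by simp [hx]))]
    rfl

-- main bridge: B's char scan equals A's loop over the lines
theorem findB_eq_findLoopA (m : Nat) : ∀ (chars : List Char), chars.length ≤ m → ∀ (n c bi : Int),
    findB chars n c 0 bi = findLoopA ((myLines chars).map String.ofList) n c bi := by
  induction m with
  | zero =>
    intro chars hlen n c bi
    have h0 : chars = [] := List.eq_nil_of_length_eq_zero (by omega)
    subst h0
    simp only [findB, myLines, List.map_cons, List.map_nil, findLoopA]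
    rw [if_neg (by decide)]
  | succ m ih =>
    intro chars hlen n c bi
    set p : Char → Bool := fun ch => !(ch == '\n') with hp
    have hsplit : List.takeWhile p chars ++ List.dropWhile p chars = chars :=
      List.takeWhile_append_dropWhile
    have hnl : ∀ ch ∈ List.takeWhile p chars, ch ≠ '\n' := by
      intro ch hch
      have := List.mem_takeWhile_imp hch
      simpa [hp] using this
    cases hd : List.dropWhile p chars with
    | nil =>
      have hchars : chars = List.takeWhile p chars := by
        conv_lhs => rw [← hsplit]
        rw [hd, List.append_nil]
      have hnl' : ∀ ch ∈ chars, ch ≠ '\n' := fun ch hch => hnl ch (hchars ▸ hch)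
      rw [myLines_no_nl chars hnl', List.map_cons, List.map_nil, findLoopA]
      have hline := findB_line chars [] n c 0 bi hnl' le_rfl (by norm_num)
      rw [List.append_nil] at hline
      rw [hline]
      by_cases hs : scanLine chars 0 = 3
      · rw [if_pos hs, if_pos ((fence_iff chars).mp hs)]
        by_cases hcbi : c = bi <;> simp [hcbi, findB, findLoopA]
      · rw [if_neg hs, if_neg (fun h => hs ((fence_iff chars).mpr h))]
        simp [findB, findLoopA]
    | cons ch r' =>
      have hch : ch = '\n' := by
        have h2 : List.dropWhile p chars ≠ [] := by simp [hd]
        have := List.head_dropWhile_not (p := p) (l := chars) h2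
        have h3 : p ch = false := by
          rw [← Bool.not_eq_true]
          simpa [List.head_eq_iff_head?_eq_some, hd] using this
        simpa [hp] using h3
      subst hch
      set l := List.takeWhile p chars with hl
      have hchars : chars = l ++ '\n' :: r' := by rw [← hsplit, hd]
      have hlen' : r'.length ≤ m := by
        have := congrArg List.length hchars
        simp at this
        omega
      rw [hchars, myLines_append l r' hnl, List.map_cons, findLoopA]
      rw [findB_line l ('\n' :: r') n c 0 bi hnl le_rfl (by norm_num)]
      have hstep : ∀ (a b st : Int), findB ('\n' :: r') a b st bi = findB r' (a+1) b 0 bi := by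
        intro a b st; simp [findB]
      by_cases hs : scanLine l 0 = 3
      · rw [if_pos hs, if_pos ((fence_iff l).mp hs)]
        by_cases hcbi : c = bi
        · simp [hcbi]
        · rw [if_neg hcbi, if_neg hcbi, hstep, ih r' hlen' (n+1) (c+1) bi]
      · rw [if_neg hs, if_neg (fun h => hs ((fence_iff l).mpr h)), hstep, ih r' hlen' (n+1) c bi]

-- ===== VERDICT (by name: the statement is the Claim_ definition above) =====
theorem find_code_block_line_py_spec : Claim_equal_find_code_block_line_py := by
  intro content bi _
  unfold Spec_find_code_block_line_py find_code_block_line_py find_code_block_line_py_alt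
  have h1 : (PySem.Str.split? content "\n").getD []
      = (myLines content.toList).map String.ofList := by
    rw [PySem.Str.split?, PySem.Chars.split?]
    rw [if_neg (by decide)]
    rw [show ("\n" : String).toList = ['\n'] by decide, splitOn_eq_myLines]
    rfl
  rw [h1, ← findB_eq_findLoopA content.toList.length content.toList le_rfl]
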